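-- pv_equiv track=rewrite | github.com/deepak16686/myfirstrepository | rag-ai/catalog_refresh.py | select_preferred_tag
-- ===== SOURCE A (Python) =====
-- def select_preferred_tag(tags, base_key):
--     """Select preferred tag based on base_key rules"""
--     if not tags:
--         return None
--
--     # Define selection rules per base_key
--     rules = {
--         'python': ['3.12-slim', '3.11-slim', '3.12', '3.11'],
--         'node': ['20-alpine', '18-alpine', '20', '18'],
--         'java': ['17-alpine', '17', '11-alpine', '11'],
--         'temurin': ['17-alpine', '17-jdk', '17'],
--         'redis': ['7-alpine', '7', '6-alpine']
--     }
--
--     preferred = rules.get(base_key, [])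
--
--     # Try to match preferred tags
--     for pref in preferred:
--         for tag in tags:
--             if pref in tag:
--                 return tag
--
--     # Fallback to 'latest' or first tag
--     if 'latest' in tags:
--         return 'latest'
--     return tags[0] if tags else None
-- ===== SOURCE B (Python) =====
-- _RULES = (
--     ('python', ('3.12-slim', '3.11-slim', '3.12', '3.11')),
--     ('node', ('20-alpine', '18-alpine', '20', '18')),
--     ('java', ('17-alpine', '17', '11-alpine', '11')),
--     ('temurin', ('17-alpine', '17-jdk', '17')),
--     ('redis', ('7-alpine', '7', '6-alpine')),
-- )
--
--
-- def _rank(preferred, tag):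
--     """Index of the first preferred pattern contained in tag (len if none)."""
--     return next((i for i, p in enumerate(preferred) if p in tag), len(preferred))
--
--
-- def select_preferred_tag(tags, base_key):
--     """Select preferred tag based on base_key rules (single scoring pass)."""
--     if not tags:
--         return None
--
--     preferred = next((ps for k, ps in _RULES if k == base_key), ())
--
--     # One pass over tags: keep the lowest-ranked tag; strict comparison
--     # means the earliest tag wins ties.
--     best = None  # (rank, tag)
--     for tag in tags:
--         r = _rank(preferred, tag)
--         if best is None or r < best[0]:
--             best = (r, tag)
--
--     if best[0] < len(preferred):
--         return best[1]
--     if 'latest' in tags: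
--         return 'latest'
--     return tags[0]
-- ===== Notes on version B (the rewrite author's own statement) =====
-- stated objective: alternative
-- what changed: Replaced the nested preferred-outer/tags-inner early-return loops by a single pass over tags that scores each tag with the index of the first preferred pattern it contains and keeps the running minimum (earliest tag wins ties).
import Mathlib
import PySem

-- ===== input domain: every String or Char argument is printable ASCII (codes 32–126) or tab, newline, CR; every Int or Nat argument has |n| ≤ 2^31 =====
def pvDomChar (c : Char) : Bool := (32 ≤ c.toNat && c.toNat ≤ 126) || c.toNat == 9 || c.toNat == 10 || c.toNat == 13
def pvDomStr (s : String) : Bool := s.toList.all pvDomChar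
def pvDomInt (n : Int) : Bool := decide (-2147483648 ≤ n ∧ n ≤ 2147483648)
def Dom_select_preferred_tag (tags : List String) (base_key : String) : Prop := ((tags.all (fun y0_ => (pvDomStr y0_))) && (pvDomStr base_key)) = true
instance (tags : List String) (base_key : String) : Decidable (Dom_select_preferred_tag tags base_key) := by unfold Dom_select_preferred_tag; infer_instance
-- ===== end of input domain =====

-- B replaces A's nested preferred-outer/tags-inner early-return loops by one pass over tags
-- that scores each tag (index of first preferred pattern it contains) and keeps the running
-- minimum; same cost class ("alternative"), return values proved identical on all inputs.

-- ===== PORT A =====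
-- the rules dict (shared data literal; both Pythons define the same table)
def pvRulesList : List (String × List String) :=
  [("python", ["3.12-slim", "3.11-slim", "3.12", "3.11"]),
   ("node", ["20-alpine", "18-alpine", "20", "18"]),
   ("java", ["17-alpine", "17", "11-alpine", "11"]),
   ("temurin", ["17-alpine", "17-jdk", "17"]),
   ("redis", ["7-alpine", "7", "6-alpine"])]

def pvRules : PySem.Dict String (List String) :=
  PySem.Dict.ofList pvRulesList

-- inner loop of A: first tag containing pref
def aFirstTag (p : String) (tags : List String) : Option String :=
  match tags with
  | [] => none
  | t :: ts => if PySem.Str.isIn p t then some t else aFirstTag p ts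

-- outer loop of A over the preferred patterns
def aLoop (prefs : List String) (tags : List String) : Option String :=
  match prefs with
  | [] => none
  | p :: ps =>
    match aFirstTag p tags with
    | some t => some t
    | none => aLoop ps tags

def select_preferred_tag (tags : List String) (base_key : String) : Option String :=
  if tags = [] then none
  else
    let preferred := PySem.Dict.getD pvRules base_key []
    match aLoop preferred tags with
    | some t => some t
    | none =>
      if tags.contains "latest" then some "latest"
      else match tags with
        | [] => none
        | t :: _ => some t

-- ===== PORT B =====
-- B's rules lookup: first pair whose key equals base_key (next(... if k == base_key), ())
def bLookup (rules : List (String × List String)) (key : String) : List String :=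
  match rules with
  | [] => []
  | (k, ps) :: rest => if k = key then ps else bLookup rest key

-- rank of a tag: index of the first preferred pattern it contains (= prefs.length if none)
def bRank (prefs : List String) (tag : String) : Nat :=
  match prefs with
  | [] => 0
  | p :: ps => if PySem.Str.isIn p tag then 0 else bRank ps tag + 1

-- one step of B's single pass: keep the best (rank, tag), earliest wins ties (strict <)
def bStep (prefs : List String) (b : Option (Nat × String)) (tag : String) : Option (Nat × String) :=
  match b with
  | none => some (bRank prefs tag, tag)
  | some (r, t) => if bRank prefs tag < r then some (bRank prefs tag, tag) else some (r, t)

def select_preferred_tag_alt (tags : List String) (base_key : String) : Option String :=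
  match tags with
  | [] => none
  | t0 :: _ =>
    let preferred := bLookup pvRulesList base_key
    match tags.foldl (bStep preferred) none with
    | none => none   -- unreachable: tags is nonempty, so the fold produces a best
    | some (r, t) =>
      if r < preferred.length then some t
      else if tags.contains "latest" then some "latest"
      else some t0

-- ===== PRECONDITION & SPEC =====
def Spec_select_preferred_tag (tags : List String) (base_key : String) (out : Option String) : Prop := out = select_preferred_tag_alt tags base_key
instance (tags : List String) (base_key : String) (out : Option String) : Decidable (Spec_select_preferred_tag tags base_key out) := by unfold Spec_select_preferred_tag; infer_instance

-- ===== CLAIM (what is proved, stated in full; the proofs are below) =====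
def Claim_equal_select_preferred_tag : Prop := ∀ (tags : List String) (base_key : String), Dom_select_preferred_tag tags base_key → Spec_select_preferred_tag tags base_key (select_preferred_tag tags base_key)

-- ===== LEMMAS AND PROOFS =====

-- a rank-0 best is absorbing for the rest of the pass
theorem bStep_zero_absorb (prefs tags : List String) (t : String) :
    tags.foldl (bStep prefs) (some (0, t)) = some (0, t) := by
  induction tags with
  | nil => rfl
  | cons tag ts ih => simpa [bStep] using ih

-- the fold never returns to `none` from a `some` state
theorem bFold_some (prefs tags : List String) (r : Nat) (t : String) :
    ∃ r' t', tags.foldl (bStep prefs) (some (r, t)) = some (r', t') := by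
  induction tags generalizing r t with
  | nil => exact ⟨r, t, rfl⟩
  | cons tag ts ih =>
    simp only [List.foldl, bStep]
    split <;> exact ih _ _

-- if some tag contains p, the pass over prefs (p::ps) ends at (0, first such tag),
-- from any state that is none or has rank ≥ 1
theorem bFold_hit (p : String) (ps : List String) (tags : List String) (t : String)
    (h : aFirstTag p tags = some t) (s : Option (Nat × String))
    (hs : ∀ r t', s = some (r, t') → 1 ≤ r) :
    tags.foldl (bStep (p :: ps)) s = some (0, t) := by
  induction tags generalizing s with
  | nil => simp [aFirstTag] at h
  | cons tag ts ih =>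
    by_cases hc : PySem.Chars.isIn p.toList tag.toList = true
    · have ht : tag = t := by simpa [aFirstTag, hc] using h
      subst ht
      have hstep : bStep (p :: ps) s tag = some (0, tag) := by
        rcases s with _ | ⟨r, t'⟩
        · simp [bStep, bRank, hc]
        · have hr := hs r t' rfl
          simp [bStep, bRank, hc, Nat.lt_of_lt_of_le Nat.zero_lt_one hr]
      simpa [List.foldl, hstep] using bStep_zero_absorb (p :: ps) ts tag
    · have hc' : PySem.Chars.isIn p.toList tag.toList = false := by simpa using hc
      have h' : aFirstTag p ts = some t := by simpa [aFirstTag, hc'] using h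
      simp only [List.foldl]
      apply ih h'
      rcases s with _ | ⟨r0, t0⟩
      · intro r t' hst
        simp [bStep, bRank, hc'] at hst
        omega
      · have hr0 := hs r0 t0 rfl
        by_cases hlt : bRank ps tag + 1 < r0 <;>
        · intro r t' hst
          simp [bStep, bRank, hc', hlt] at hst
          obtain ⟨h1, -⟩ := hst
          omega

-- if no tag contains p, the pass with (p::ps) is the pass with ps, ranks shifted by one
theorem bFold_shift (p : String) (ps : List String) (tags : List String)
    (h : ∀ tag ∈ tags, PySem.Chars.isIn p.toList tag.toList = false) (s : Option (Nat × String)) :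
    tags.foldl (bStep (p :: ps)) (s.map (fun rt => (rt.1 + 1, rt.2)))
      = (tags.foldl (bStep ps) s).map (fun rt => (rt.1 + 1, rt.2)) := by
  induction tags generalizing s with
  | nil => rfl
  | cons tag ts ih =>
    have hc := h tag (List.mem_cons_self ..)
    have hrest : ∀ tag ∈ ts, PySem.Chars.isIn p.toList tag.toList = false :=
      fun x hx => h x (List.mem_cons_of_mem _ hx)
    have hstep : bStep (p :: ps) (s.map (fun rt => (rt.1 + 1, rt.2))) tag
        = (bStep ps s tag).map (fun rt => (rt.1 + 1, rt.2)) := by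
      rcases s with _ | ⟨r, t'⟩
      · simp [bStep, bRank, hc]
      · by_cases hlt : bRank ps tag < r <;>
          simp [bStep, bRank, hc, hlt]
    simpa [List.foldl, hstep] using ih hrest (bStep ps s tag)

-- aFirstTag = none means no tag contains p
theorem aFirstTag_none (p : String) (tags : List String) (h : aFirstTag p tags = none) :
    ∀ tag ∈ tags, PySem.Chars.isIn p.toList tag.toList = false := by
  induction tags with
  | nil => simp
  | cons t ts ih =>
    by_cases hc : PySem.Chars.isIn p.toList t.toList = true
    · simp [aFirstTag, hc] at h
    · have hc' : PySem.Chars.isIn p.toList t.toList = false := by simpa using hc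
      have h' : aFirstTag p ts = none := by simpa [aFirstTag, hc'] using h
      intro tag htag
      rcases List.mem_cons.mp htag with rfl | hm
      · exact hc'
      · exact ih h' tag hm

-- B's hand-written first-match lookup agrees with A's dict lookup
theorem bLookup_eq_find (l : List (String × List String)) (k : String) :
    bLookup l k = ((l.find? (fun p => p.1 == k)).map (fun p => p.2)).getD [] := by
  induction l with
  | nil => rfl
  | cons p rest ih =>
    by_cases hk : p.1 = k
    · simp [bLookup, List.find?, hk]
    · have hb : (p.1 == k) = false := by simpa [beq_iff_eq] using hk
      simp only [bLookup, List.find?, hb]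
      rw [if_neg hk]
      exact ih

theorem pref_eq (k : String) :
    bLookup pvRulesList k = PySem.Dict.getD pvRules k [] := by
  have hitems : pvRules.items = pvRulesList := by decide
  rw [PySem.Dict.getD, PySem.Dict.get?, hitems, bLookup_eq_find]

-- main correspondence: B's scored single pass reproduces A's nested loops
theorem main_corr (prefs : List String) (tag : String) (ts : List String) :
    (match (tag :: ts).foldl (bStep prefs) none with
     | none => none
     | some (r, t) => if r < prefs.length then some t else none)
      = aLoop prefs (tag :: ts) := by
  induction prefs with
  | nil =>
    have hfold : (tag :: ts).foldl (bStep []) none = some (0, tag) := by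
      simpa [List.foldl, bStep, bRank] using bStep_zero_absorb [] ts tag
    simp [hfold, aLoop]
  | cons p ps ih =>
    cases hft : aFirstTag p (tag :: ts) with
    | some t =>
      have hfold := bFold_hit p ps (tag :: ts) t hft none (by simp)
      simp [hfold, aLoop, hft]
    | none =>
      have hall := aFirstTag_none p (tag :: ts) hft
      have hshift := bFold_shift p ps (tag :: ts) hall none
      simp only [Option.map_none] at hshift
      obtain ⟨r, t, hfold⟩ : ∃ r' t', (tag :: ts).foldl (bStep ps) none = some (r', t') := by
        simp only [List.foldl, bStep]
        exact bFold_some ps ts _ _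
      rw [hfold] at hshift
      simp only [Option.map_some] at hshift
      rw [hfold] at ih
      rw [hshift]
      simp only [aLoop, hft]
      rw [← ih]
      simp only [List.length_cons]
      by_cases hlt : r < ps.length <;> simp [hlt]

-- ===== VERDICT (by name: the statement is the Claim_ definition above) =====
theorem select_preferred_tag_spec : Claim_equal_select_preferred_tag := by
  intro tags base_key _
  unfold Spec_select_preferred_tag select_preferred_tag select_preferred_tag_alt
  match tags with
  | [] => rfl
  | t0 :: ts =>
    simp only [reduceCtorEq, if_false]
    rw [pref_eq base_key]
    have hmain := main_corr (PySem.Dict.getD pvRules base_key []) t0 ts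
    obtain ⟨r, t, hfold⟩ : ∃ r' t', (t0 :: ts).foldl (bStep (PySem.Dict.getD pvRules base_key [])) none = some (r', t') := by
      simp only [List.foldl, bStep]
      exact bFold_some _ ts _ _
    rw [hfold] at hmain ⊢
    by_cases hlt : r < (PySem.Dict.getD pvRules base_key []).length
    · simp only [hlt, if_true] at hmain ⊢
      rw [← hmain]
    · simp only [hlt, if_false] at hmain ⊢
      rw [← hmain]
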